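-- pv_equiv track=rewrite | github.com/chhotii-alex/new-fda | src/new_fda/parse_results.py | substitutions
-- ===== SOURCE A (Python) =====
-- misspellings = {}
--
-- def subs(c, second_pass):
--     if c.isalpha():
--         return c
--     if c.isdigit():
--         if second_pass:
--             return "9"
--         else:
--             return c
--     if c in "./():;<>":
--         return c
--     return " "
--
-- def substitutions(s, second_pass):
--     t = ''.join([subs(c, second_pass) for c in s])
--     if second_pass:
--         t = " ".join([word.rstrip(".") for word in t.split()])
--     def strip_start_period(word):
--         p = word.lstrip(".")
--         if len(p) and not p[0].isdigit():
--             word = p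
--         return word
--     t = " ".join([strip_start_period(word) for word in t.split()])
--     def replace_misspellings(word):
--         if word in misspellings:
--             return misspellings[word]
--         return word
--     t = " ".join([replace_misspellings(word) for word in t.split()])
--     return t
-- ===== SOURCE B (Python) =====
-- misspellings = {}
--
-- def subs(c, second_pass):
--     if c.isalpha():
--         return c
--     if c.isdigit():
--         if second_pass:
--             return "9"
--         else:
--             return c
--     if c in "./():;<>":
--         return c
--     return " "
--
-- def substitutions(s, second_pass):
--     out = []
--     for word in ''.join(subs(c, second_pass) for c in s).split():
--         if second_pass:
--             word = word.rstrip(".")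
--             if not word:
--                 continue
--         p = word.lstrip(".")
--         if p and not p[0].isdigit():
--             word = p
--         out.append(misspellings.get(word, word))
--     return ' '.join(out)
-- ===== Notes on version B (the rewrite author's own statement) =====
-- stated objective: simpler
-- what changed: Replaces A's three repeated tokenize/transform/rejoin passes (rstrip pass, strip-start-period pass, misspellings pass, each with its own split and join) by a single split followed by one explicit loop that applies all word fixes and skips words emptied by rstrip, joining once at the end.
import Mathlib
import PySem

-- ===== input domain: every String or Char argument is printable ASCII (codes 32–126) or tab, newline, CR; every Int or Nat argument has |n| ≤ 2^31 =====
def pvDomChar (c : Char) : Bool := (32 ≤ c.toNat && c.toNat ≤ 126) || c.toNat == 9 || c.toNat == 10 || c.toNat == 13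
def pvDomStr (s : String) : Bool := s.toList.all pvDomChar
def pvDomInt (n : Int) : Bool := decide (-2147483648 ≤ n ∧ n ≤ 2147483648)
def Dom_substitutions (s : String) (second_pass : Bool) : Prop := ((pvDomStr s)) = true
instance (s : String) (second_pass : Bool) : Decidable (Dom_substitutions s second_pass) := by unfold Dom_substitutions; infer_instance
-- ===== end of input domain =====

-- B replaces A's three repeated tokenize/transform/rejoin passes by ONE split and ONE explicit loop
-- applying all word fixes (objective: simpler).

-- ===== PORT A =====
-- module-level 'misspellings = {}'
def misspellings : PySem.Dict (List Char) (List Char) := PySem.Dict.empty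

-- subs(c, second_pass): every string subs returns has length 1, so it is ported as a Char
def pySubs (c : Char) (second_pass : Bool) : Char :=
  if PySem.Chars.isalpha c then c
  else if PySem.Chars.isdigit c then (if second_pass then '9' else c)
  else if PySem.Chars.isIn [c] ("./():;<>".toList) then c
  else ' '

-- word.rstrip(".") / word.lstrip("."): exact hand port of one-sided strip with char set "."
def rstripDot (w : List Char) : List Char := (w.reverse.dropWhile (· == '.')).reverse
def lstripDot (w : List Char) : List Char := w.dropWhile (· == '.')

-- strip_start_period(word) ('len(p) and not p[0].isdigit()'; p[0] guarded by nonemptiness)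
def stripStartPeriod (w : List Char) : List Char :=
  let p := lstripDot w
  if !p.isEmpty && !PySem.Chars.isdigit (p.headD ' ') then p else w

-- replace_misspellings(word) ('if word in misspellings: return misspellings[word]'; the lookup is guarded)
def replaceMisspellings (w : List Char) : List Char :=
  match misspellings.get? w with
  | some v => v
  | none => w

def substitutions (s : String) (second_pass : Bool) : String :=
  let t0 := PySem.Chars.join [] (s.toList.map (fun c => [pySubs c second_pass]))
  let t1 := if second_pass then
              PySem.Chars.join [' '] ((PySem.Chars.split₀ t0).map rstripDot)
            else t0
  let t2 := PySem.Chars.join [' '] ((PySem.Chars.split₀ t1).map stripStartPeriod)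
  let t3 := PySem.Chars.join [' '] ((PySem.Chars.split₀ t2).map replaceMisspellings)
  String.ofList t3

-- ===== PORT B =====
def substitutions_alt (s : String) (second_pass : Bool) : String :=
  let t := PySem.Chars.join [] (s.toList.map (fun c => [pySubs c second_pass]))
  let out := (PySem.Chars.split₀ t).foldl (fun acc word =>
      let w := if second_pass then rstripDot word else word    -- 'word = word.rstrip(".")' under second_pass
      if second_pass && w.isEmpty then acc                     -- 'if not word: continue'
      else
        let p := lstripDot w
        let w' := if !p.isEmpty && !PySem.Chars.isdigit (p.headD ' ') then p else w
        acc ++ [misspellings.getD w' w']) []                   -- 'misspellings.get(word, word)'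
  String.ofList (PySem.Chars.join [' '] out)

-- ===== PRECONDITION & SPEC =====
def Spec_substitutions (s : String) (second_pass : Bool) (out : String) : Prop := out = substitutions_alt s second_pass
instance (s : String) (second_pass : Bool) (out : String) : Decidable (Spec_substitutions s second_pass out) := by unfold Spec_substitutions; infer_instance

-- ===== CLAIM (what is proved, stated in full; the proofs are below) =====
def Claim_equal_substitutions : Prop := ∀ (s : String) (second_pass : Bool), Dom_substitutions s second_pass → Spec_substitutions s second_pass (substitutions s second_pass)

-- ===== LEMMAS AND PROOFS =====

-- a word is "good" if it is nonempty and contains no whitespace (what str.split() produces)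
def Wsfree (w : List Char) : Prop := ∀ c ∈ w, PySem.Chars.isspace c = false
def Good (w : List Char) : Prop := w.isEmpty = false ∧ Wsfree w

theorem go_nil (cur acc) : PySem.Chars.split₀.go [] cur acc =
    if cur.isEmpty then acc.reverse else (cur.reverse :: acc).reverse := rfl

theorem go_cons_ws {c : Char} (h : PySem.Chars.isspace c = true) (t cur acc) :
    PySem.Chars.split₀.go (c :: t) cur acc =
      if cur.isEmpty then PySem.Chars.split₀.go t [] acc
      else PySem.Chars.split₀.go t [] (cur.reverse :: acc) := by
  simp [PySem.Chars.split₀.go, h]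

theorem go_cons_nws {c : Char} (h : PySem.Chars.isspace c = false) (t cur acc) :
    PySem.Chars.split₀.go (c :: t) cur acc = PySem.Chars.split₀.go t (c :: cur) acc := by
  simp [PySem.Chars.split₀.go, h]

theorem go_word (w : List Char) (h : Wsfree w) (t cur acc) :
    PySem.Chars.split₀.go (w ++ t) cur acc = PySem.Chars.split₀.go t (w.reverse ++ cur) acc := by
  induction w generalizing cur with
  | nil => simp
  | cons c w ih =>
      have hc := h c (by simp)
      rw [List.cons_append, go_cons_nws hc, ih (fun x hx => h x (by simp [hx]))]
      simp

theorem go_join (ws : List (List Char)) (h : ∀ w ∈ ws, Wsfree w) (acc : List (List Char)) :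
    PySem.Chars.split₀.go (PySem.Chars.join [' '] ws) [] acc =
      acc.reverse ++ ws.filter (fun w => !w.isEmpty) := by
  induction ws generalizing acc with
  | nil => simp [PySem.Chars.join_nil, go_nil]
  | cons w rest ih =>
      have hw := h w (by simp)
      have hrest : ∀ x ∈ rest, Wsfree x := fun x hx => h x (by simp [hx])
      cases rest with
      | nil =>
          rw [PySem.Chars.join_singleton, show w = w ++ [] by simp, go_word w hw]
          by_cases hemp : w.isEmpty
          · simp [go_nil, hemp]
          · have h' : w.isEmpty = false := by simpa using hemp
            simp [go_nil, h']
      | cons r rs =>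
          rw [PySem.Chars.join_cons_cons, List.append_assoc, go_word w hw,
            List.singleton_append, go_cons_ws (by decide)]
          simp only [List.append_nil, List.isEmpty_reverse, List.reverse_reverse]
          by_cases hemp : w.isEmpty
          · rw [if_pos hemp, ih hrest]
            simp [hemp]
          · have h' : w.isEmpty = false := by simpa using hemp
            rw [if_neg hemp, ih hrest]
            simp [h']

theorem split₀_join_filter (ws : List (List Char)) (h : ∀ w ∈ ws, Wsfree w) :
    PySem.Chars.split₀ (PySem.Chars.join [' '] ws) = ws.filter (fun w => !w.isEmpty) := by
  have := go_join ws h []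
  simpa [PySem.Chars.split₀] using this

theorem split₀_join_good (ws : List (List Char)) (h : ∀ w ∈ ws, Good w) :
    PySem.Chars.split₀ (PySem.Chars.join [' '] ws) = ws := by
  rw [split₀_join_filter ws (fun w hw => (h w hw).2)]
  exact List.filter_eq_self.2 (fun w hw => by simp [(h w hw).1])

theorem go_all_good (t : List Char) (cur : List Char) (acc : List (List Char))
    (hcur : Wsfree cur) (hacc : ∀ w ∈ acc, Good w) :
    ∀ w ∈ PySem.Chars.split₀.go t cur acc, Good w := by
  induction t generalizing cur acc with
  | nil =>
      rw [go_nil]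
      split_ifs with hemp
      · simpa using hacc
      · intro w hw
        simp only [List.reverse_cons, List.mem_append, List.mem_reverse, List.mem_singleton] at hw
        rcases hw with hw | rfl
        · exact hacc w hw
        · refine ⟨by simpa using hemp, fun c hc => hcur c (by simpa using hc)⟩
  | cons c t ih =>
      by_cases hc : PySem.Chars.isspace c
      · rw [go_cons_ws hc]
        split_ifs with hemp
        · exact ih [] acc (by simp [Wsfree]) hacc
        · refine ih [] _ (by simp [Wsfree]) ?_
          intro w hw
          rcases List.mem_cons.1 hw with rfl | hw
          · exact ⟨by simpa using hemp, fun x hx => hcur x (by simpa using hx)⟩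
          · exact hacc w hw
      · rw [go_cons_nws (by simpa using hc)]
        refine ih _ _ ?_ hacc
        intro x hx
        rcases List.mem_cons.1 hx with rfl | hx
        · simpa using hc
        · exact hcur x hx

theorem split₀_good (t : List Char) : ∀ w ∈ PySem.Chars.split₀ t, Good w :=
  go_all_good t [] [] (by simp [Wsfree]) (by simp)

theorem wsfree_rstripDot {w : List Char} (h : Wsfree w) : Wsfree (rstripDot w) := by
  intro c hc
  apply h
  have : c ∈ w.reverse.dropWhile (· == '.') := by simpa [rstripDot] using hc
  exact List.mem_reverse.1 ((List.dropWhile_sublist _).subset this)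

theorem wsfree_lstripDot {w : List Char} (h : Wsfree w) : Wsfree (lstripDot w) := by
  intro c hc
  exact h c ((List.dropWhile_sublist _).subset hc)

theorem stripStartPeriod_eq (w : List Char) : stripStartPeriod w =
    if (!(lstripDot w).isEmpty && !PySem.Chars.isdigit ((lstripDot w).headD ' ')) then
      lstripDot w else w := rfl

theorem good_stripStartPeriod {w : List Char} (h : Good w) : Good (stripStartPeriod w) := by
  by_cases hcond : (!(lstripDot w).isEmpty && !PySem.Chars.isdigit ((lstripDot w).headD ' ')) = true
  · rw [stripStartPeriod_eq, if_pos hcond]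
    simp only [Bool.and_eq_true, Bool.not_eq_true'] at hcond
    exact ⟨hcond.1, wsfree_lstripDot h.2⟩
  · rw [stripStartPeriod_eq, if_neg hcond]
    exact h

theorem replaceMisspellings_id (w : List Char) : replaceMisspellings w = w := rfl

theorem getD_empty (w d : List Char) : misspellings.getD w d = d := rfl

-- the word fix B applies, named for the proofs
def pvFix (w : List Char) : List Char :=
  let p := lstripDot w
  let w' := if !p.isEmpty && !PySem.Chars.isdigit (p.headD ' ') then p else w
  misspellings.getD w' w'

theorem pvFix_eq (w : List Char) : pvFix w = stripStartPeriod w := by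
  simp [pvFix, stripStartPeriod, getD_empty]

theorem foldB_false (ws : List (List Char)) (acc : List (List Char)) :
    ws.foldl (fun acc word =>
      if (false && word.isEmpty) then acc
      else acc ++ [misspellings.getD
        (if (!(lstripDot word).isEmpty && !PySem.Chars.isdigit ((lstripDot word).headD ' ')) then
          lstripDot word else word)
        (if (!(lstripDot word).isEmpty && !PySem.Chars.isdigit ((lstripDot word).headD ' ')) then
          lstripDot word else word)]) acc
    = acc ++ ws.map pvFix := by
  simpa [pvFix] using PySem.List.foldl_append_singleton_eq_map pvFix ws acc

theorem foldB_true (ws : List (List Char)) (acc : List (List Char)) :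
    ws.foldl (fun acc word =>
      if (true && (rstripDot word).isEmpty) then acc
      else acc ++ [misspellings.getD
        (if (!(lstripDot (rstripDot word)).isEmpty &&
            !PySem.Chars.isdigit ((lstripDot (rstripDot word)).headD ' ')) then
          lstripDot (rstripDot word) else rstripDot word)
        (if (!(lstripDot (rstripDot word)).isEmpty &&
            !PySem.Chars.isdigit ((lstripDot (rstripDot word)).headD ' ')) then
          lstripDot (rstripDot word) else rstripDot word)]) acc
    = acc ++ ((ws.map rstripDot).filter (fun w => !w.isEmpty)).map pvFix := by
  induction ws generalizing acc with
  | nil => simp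
  | cons w ws ih =>
      simp only [List.foldl_cons, List.map_cons, List.filter_cons]
      by_cases hemp : (rstripDot w).isEmpty
      · simp only [hemp, Bool.and_true, if_pos, Bool.not_true]
        rw [ih]
        simp
      · have h' : (rstripDot w).isEmpty = false := by simpa using hemp
        simp only [h', Bool.and_false, Bool.not_false]
        rw [ih]
        simp [pvFix]

-- ===== VERDICT (by name: the statement is the Claim_ definition above) =====
theorem substitutions_spec : Claim_equal_substitutions := by
  intro s second_pass _hdom
  unfold Spec_substitutions substitutions substitutions_alt
  cases second_pass
  · -- second_pass = false
    simp only [Bool.false_eq_true, if_false]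
    rw [foldB_false]
    have hg : ∀ w ∈ (PySem.Chars.split₀
        (PySem.Chars.join [] (s.toList.map (fun c => [pySubs c false])))).map stripStartPeriod,
        Good w := by
      intro w hw
      rcases List.mem_map.1 hw with ⟨x, hx, rfl⟩
      exact good_stripStartPeriod (split₀_good _ x hx)
    rw [split₀_join_good _ hg, funext pvFix_eq]
    simp [Function.comp_def, replaceMisspellings_id]
  · -- second_pass = true
    simp only [if_pos]
    rw [foldB_true]
    set ws0 := PySem.Chars.split₀
        (PySem.Chars.join [] (s.toList.map (fun c => [pySubs c true]))) with hws0
    have h1 : ∀ w ∈ ws0.map rstripDot, Wsfree w := by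
      intro w hw
      rcases List.mem_map.1 hw with ⟨x, hx, rfl⟩
      exact wsfree_rstripDot (split₀_good _ x hx).2
    rw [split₀_join_filter _ h1]
    have h2 : ∀ w ∈ ((ws0.map rstripDot).filter (fun w => !w.isEmpty)).map stripStartPeriod,
        Good w := by
      intro w hw
      rcases List.mem_map.1 hw with ⟨x, hx, rfl⟩
      have hx' := List.mem_filter.1 hx
      refine good_stripStartPeriod ⟨by simpa using hx'.2, ?_⟩
      rcases List.mem_map.1 hx'.1 with ⟨y, hy, rfl⟩
      exact wsfree_rstripDot (split₀_good _ y hy).2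
    rw [split₀_join_good _ h2, funext pvFix_eq]
    simp [Function.comp_def, replaceMisspellings_id]
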